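-- pv_equiv track=rewrite | github.com/MeganOesting/malaysia-swimming-analytics | scripts/import_matched_athletes.py | count_matching_words
-- ===== SOURCE A (Python) =====
-- def levenshtein_distance(s1, s2):
--     """Calculate edit distance"""
--     if len(s1) < len(s2):
--         return levenshtein_distance(s2, s1)
--     if len(s2) == 0:
--         return len(s1)
--     previous_row = range(len(s2) + 1)
--     for i, c1 in enumerate(s1):
--         current_row = [i + 1]
--         for j, c2 in enumerate(s2):
--             insertions = previous_row[j + 1] + 1
--             deletions = current_row[j] + 1
--             substitutions = previous_row[j] + (c1 != c2)
--             current_row.append(min(insertions, deletions, substitutions))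
--         previous_row = current_row
--     return previous_row[-1]
--
-- def fuzzy_word_match(word1, word2, max_distance=1):
--     """Check if two words are similar"""
--     if word1 == word2:
--         return True
--     if len(word1) < 4 or len(word2) < 4:
--         return False
--     return levenshtein_distance(word1, word2) <= max_distance
--
-- def count_matching_words(words1, words2):
--     """Count matches including fuzzy"""
--     exact_matches = words1.intersection(words2)
--     fuzzy_matches = set()
--     unmatched1 = words1 - exact_matches
--     unmatched2 = words2 - exact_matches
--     for w1 in unmatched1:
--         for w2 in unmatched2:
--             if fuzzy_word_match(w1, w2):
--                 fuzzy_matches.add(w1)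
--                 break
--     return len(exact_matches) + len(fuzzy_matches)
-- ===== SOURCE B (Python) =====
-- def _is_edit1(a, b):
--     """True iff edit distance(a, b) <= 1, by direct structural comparison."""
--     if a == b:
--         return True
--     if len(a) > len(b):
--         a, b = b, a
--     if len(a) == len(b):
--         return sum(x != y for x, y in zip(a, b)) == 1
--     if len(b) - len(a) != 1:
--         return False
--     i = 0
--     while i < len(a) and a[i] == b[i]:
--         i += 1
--     return a[i:] == b[i + 1:]
--
-- def _variants(w):
--     """The word itself plus every single-character deletion of it."""
--     return [w] + [w[:i] + w[i + 1:] for i in range(len(w))]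
--
-- def count_matching_words(words1, words2):
--     """Count matches including fuzzy"""
--     exact_matches = words1.intersection(words2)
--     unmatched1 = words1 - exact_matches
--     unmatched2 = words2 - exact_matches
--     index = {}
--     for w in unmatched2:
--         if len(w) >= 4:
--             for v in _variants(w):
--                 index.setdefault(v, []).append(w)
--     fuzzy_count = 0
--     for w1 in unmatched1:
--         if len(w1) >= 4 and any(
--             _is_edit1(w1, w2)
--             for v in _variants(w1)
--             for w2 in index.get(v, ())
--         ):
--             fuzzy_count += 1
--     return len(exact_matches) + fuzzy_count
-- ===== Notes on version B (the rewrite author's own statement) =====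
-- stated objective: faster
-- what changed: Replaces A's all-pairs Levenshtein-DP comparison of the unmatched words by a SymSpell-style deletion-variant dictionary index over unmatched2 (each word and its single-character deletions), so each word of unmatched1 only probes its own deletion variants and verifies the few candidates with a direct O(L) structural edit-distance-1 check.
import Mathlib
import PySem

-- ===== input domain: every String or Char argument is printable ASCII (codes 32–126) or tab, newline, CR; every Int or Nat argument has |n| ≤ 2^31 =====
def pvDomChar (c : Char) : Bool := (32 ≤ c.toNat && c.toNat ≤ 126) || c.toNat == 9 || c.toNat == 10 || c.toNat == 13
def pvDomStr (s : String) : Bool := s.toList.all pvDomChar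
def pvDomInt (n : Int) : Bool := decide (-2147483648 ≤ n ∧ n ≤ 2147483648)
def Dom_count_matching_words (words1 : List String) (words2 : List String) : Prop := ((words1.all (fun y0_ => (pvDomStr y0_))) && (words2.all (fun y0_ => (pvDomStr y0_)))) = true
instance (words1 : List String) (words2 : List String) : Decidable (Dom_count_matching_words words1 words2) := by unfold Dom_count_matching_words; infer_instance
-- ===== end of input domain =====

-- B replaces A's all-pairs Levenshtein scan by a deletion-variant (SymSpell-style) dictionary index
-- with a direct structural edit-distance-1 verification; objective: faster.
-- Both functions take Python sets; the List String arguments hold the distinct elements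
-- (ports dedup with PySem.Set.ofList = set(...)); the returned count is iteration-order independent.

-- ===== PORT A =====
-- Python min(a, b, c)
def pvMin3 (a b c : Int) : Int := min (min a b) c

-- inner loop body of levenshtein_distance: cur is current_row, prev is previous_row,
-- jc = (j, c2) from enumerate(s2); list indexing via pyGetD (always in range here)
def pvLevStep (c1 : Char) (prev : List Int) (cur : List Int) (jc : Int × Char) : List Int :=
  cur ++ [pvMin3 (PySem.List.pyGetD prev (jc.1 + 1) 0 + 1)
                 (PySem.List.pyGetD cur jc.1 0 + 1)
                 (PySem.List.pyGetD prev jc.1 0 + (if c1 ≠ jc.2 then 1 else 0))]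

-- body of levenshtein_distance after the initial swap (the branch 'if len(s1) < len(s2)')
def pvLevCore (s1 s2 : List Char) : Int :=
  if s2.length = 0 then (s1.length : Int)
  else
    let prev0 : List Int := PySem.List.pyRange 0 ((s2.length : Int) + 1) 1
    let finalRow := (PySem.List.enumerate s1).foldl
      (fun prev ic => (PySem.List.enumerate s2).foldl (pvLevStep ic.2 prev) [ic.1 + 1]) prev0
    PySem.List.pyGetD finalRow (-1) 0

-- levenshtein_distance: the Python recursion swaps the arguments once and then runs the body;
-- inlined here as a single conditional swap (exact)
def levenshtein_distance (s1 s2 : List Char) : Int :=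
  if s1.length < s2.length then pvLevCore s2 s1 else pvLevCore s1 s2

def fuzzy_word_match (word1 word2 : String) (maxDistance : Int) : Bool :=
  if word1 = word2 then true
  else if PySem.Str.len word1 < 4 ∨ PySem.Str.len word2 < 4 then false
  else decide (levenshtein_distance word1.toList word2.toList ≤ maxDistance)

-- the inner 'for w2 in unmatched2: if fuzzy_word_match(w1, w2): fuzzy_matches.add(w1); break'
def pvFuzzyLoop (fm : PySem.Set String) (w1 : String) : List String → PySem.Set String
  | [] => fm
  | w2 :: rest => if fuzzy_word_match w1 w2 1 then PySem.Set.add fm w1 else pvFuzzyLoop fm w1 rest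

def count_matching_words (words1 : List String) (words2 : List String) : Int :=
  let w1s : PySem.Set String := PySem.Set.ofList words1
  let w2s : PySem.Set String := PySem.Set.ofList words2
  let exact_matches := PySem.Set.inter w1s w2s
  let unmatched1 := PySem.Set.diff w1s exact_matches
  let unmatched2 := PySem.Set.diff w2s exact_matches
  let fuzzy_matches := unmatched1.foldl (fun fm w1 => pvFuzzyLoop fm w1 unmatched2) PySem.Set.empty
  PySem.Set.len exact_matches + PySem.Set.len fuzzy_matches

-- ===== PORT B =====
-- the while-loop + slice tail comparison of _is_edit1 (scan to first mismatch, then a[i:] == b[i+1:])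
def pvEdit1Scan : List Char → List Char → Bool
  | x :: xs, y :: ys => if x = y then pvEdit1Scan xs ys else decide (x :: xs = ys)
  | a, b => decide (a = b.drop 1)

-- _is_edit1
def pvIsEdit1 (a b : List Char) : Bool :=
  if a = b then true
  else
    let p := if b.length < a.length then (b, a) else (a, b)
    if p.1.length = p.2.length then
      decide ((((p.1.zip p.2).map (fun q => if q.1 ≠ q.2 then (1 : Int) else 0)).sum) = 1)
    else if (p.2.length : Int) - (p.1.length : Int) ≠ 1 then false
    else pvEdit1Scan p.1 p.2

-- _variants(w) = [w] + [w[:i] + w[i+1:] for i in range(len(w))]  (strings as List Char)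
def pvVariants (w : List Char) : List (List Char) :=
  w :: (PySem.List.pyRange 0 (w.length : Int) 1).map
    (fun i => PySem.List.slice w none (some i) ++ PySem.List.slice w (some (i + 1)) none)

def count_matching_words_alt (words1 : List String) (words2 : List String) : Int :=
  let w1s : PySem.Set String := PySem.Set.ofList words1
  let w2s : PySem.Set String := PySem.Set.ofList words2
  let exact_matches := PySem.Set.inter w1s w2s
  let unmatched1 := PySem.Set.diff w1s exact_matches
  let unmatched2 := PySem.Set.diff w2s exact_matches
  -- index.setdefault(v, []).append(w) = modify v [] (· ++ [w]); dict keyed by the variant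
  -- string, represented as List Char (String.toList is injective, so lookups agree)
  let index : PySem.Dict (List Char) (List String) :=
    unmatched2.foldl (fun d w =>
      if (4 : Int) ≤ PySem.Str.len w then
        (pvVariants w.toList).foldl (fun d v => d.modify v [] (fun l => l ++ [w])) d
      else d) PySem.Dict.empty
  let fuzzy_count : Int := unmatched1.foldl (fun n w1 =>
      if decide ((4 : Int) ≤ PySem.Str.len w1) &&
         (pvVariants w1.toList).any (fun v =>
           (index.getD v []).any (fun w2 => pvIsEdit1 w1.toList w2.toList)) then n + 1 else n) 0
  PySem.Set.len exact_matches + fuzzy_count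

-- ===== PRECONDITION & SPEC =====
def Spec_count_matching_words (words1 : List String) (words2 : List String) (out : Int) : Prop := out = count_matching_words_alt words1 words2
instance (words1 : List String) (words2 : List String) (out : Int) : Decidable (Spec_count_matching_words words1 words2 out) := by unfold Spec_count_matching_words; infer_instance

-- ===== CLAIM (what is proved, stated in full; the proofs are below) =====
def Claim_equal_count_matching_words : Prop := ∀ (words1 : List String) (words2 : List String), Dom_count_matching_words words1 words2 → Spec_count_matching_words words1 words2 (count_matching_words words1 words2)

-- ===== LEMMAS AND PROOFS =====

-- deleting the character at index i
def pvDelAt (l : List Char) (i : Nat) : List Char := l.take i ++ l.drop (i + 1)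

-- reference edit distance, front recursion arranged to match the DP's min(ins, del, sub)
def pvLev : List Char → List Char → Nat
  | [], t => t.length
  | _ :: s, [] => s.length + 1
  | x :: s, y :: t =>
      min (min (pvLev s (y :: t) + 1) (pvLev (x :: s) t + 1)) (pvLev s t + (if x = y then 0 else 1))
termination_by s t => s.length + t.length
decreasing_by all_goals (simp; try omega)

-- "edit distance ≤ 1", characterised structurally
def pvEdP (a b : List Char) : Prop :=
  a = b ∨ (∃ i, i < a.length ∧ pvDelAt a i = b) ∨ (∃ i, i < b.length ∧ pvDelAt b i = a) ∨
    (a.length = b.length ∧ a ≠ b ∧ ∃ i, i < a.length ∧ pvDelAt a i = pvDelAt b i)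

@[simp] lemma pvDelAt_zero (x : Char) (l : List Char) : pvDelAt (x :: l) 0 = l := by
  simp [pvDelAt]

@[simp] lemma pvDelAt_succ (x : Char) (l : List Char) (i : Nat) :
    pvDelAt (x :: l) (i + 1) = x :: pvDelAt l i := by simp [pvDelAt]

lemma pvDelAt_length (l : List Char) (i : Nat) (h : i < l.length) :
    (pvDelAt l i).length = l.length - 1 := by
  simp [pvDelAt]; omega

@[simp] lemma pvLev_nil_left (t : List Char) : pvLev [] t = t.length := by simp [pvLev]

lemma pvLev_nil_right (s : List Char) : pvLev s [] = s.length := by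
  cases s <;> simp [pvLev]

lemma pvLev_cons_cons (x y : Char) (s t : List Char) :
    pvLev (x :: s) (y :: t) =
      min (min (pvLev s (y :: t) + 1) (pvLev (x :: s) t + 1)) (pvLev s t + (if x = y then 0 else 1)) := by
  simp [pvLev]

lemma pvLev_eq_zero_iff (a b : List Char) : pvLev a b = 0 ↔ a = b := by
  induction a generalizing b with
  | nil => cases b <;> simp
  | cons x a ih =>
    cases b with
    | nil => simp [pvLev_nil_right]
    | cons y b =>
      rw [pvLev_cons_cons]
      by_cases hxy : x = y
      · subst hxy
        rw [if_pos rfl]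
        have h := ih b
        constructor
        · intro h0
          have hz : pvLev a b = 0 := by omega
          rw [h.mp hz]
        · intro h1
          have : a = b := by injection h1
          have hz := h.mpr this
          omega
      · rw [if_neg hxy]
        constructor
        · intro h0; omega
        · intro h1
          exact absurd (by injection h1) hxy

lemma pvEdP_nil_left (b : List Char) : pvEdP [] b ↔ b.length ≤ 1 := by
  constructor
  · rintro (rfl | ⟨i, hi, _⟩ | ⟨i, hi, hd⟩ | ⟨hl, _, _⟩)
    · simp
    · simp at hi
    · have := pvDelAt_length b i hi
      rw [hd] at this; simp at this; omega
    · simp only [List.length_nil] at hl; omega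
  · intro h
    cases b with
    | nil => exact Or.inl rfl
    | cons c t =>
      cases t with
      | nil => exact Or.inr (Or.inr (Or.inl ⟨0, by simp, by simp⟩))
      | cons d t => simp at h

lemma pvEdP_nil_right (a : List Char) : pvEdP a [] ↔ a.length ≤ 1 := by
  constructor
  · rintro (rfl | ⟨i, hi, hd⟩ | ⟨i, hi, _⟩ | ⟨hl, _, _⟩)
    · simp
    · have := pvDelAt_length a i hi
      rw [hd] at this; simp at this; omega
    · simp at hi
    · simp only [List.length_nil] at hl; omega
  · intro h
    cases a with
    | nil => exact Or.inl rfl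
    | cons c t =>
      cases t with
      | nil => exact Or.inr (Or.inl ⟨0, by simp, by simp⟩)
      | cons d t => simp at h

lemma pvEdP_cons_same (x : Char) (a b : List Char) :
    pvEdP (x :: a) (x :: b) ↔ a = x :: b ∨ x :: a = b ∨ pvEdP a b := by
  constructor
  · rintro (h | ⟨i, hi, hd⟩ | ⟨i, hi, hd⟩ | ⟨hl, hne, i, hi, hd⟩)
    · right; right; left; injection h
    · cases i with
      | zero => simp at hd; exact Or.inl hd
      | succ i =>
        simp at hd hi
        exact Or.inr (Or.inr (Or.inr (Or.inl ⟨i, hi, hd⟩)))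
    · cases i with
      | zero => simp at hd; exact Or.inr (Or.inl hd.symm)
      | succ i =>
        simp at hd hi
        exact Or.inr (Or.inr (Or.inr (Or.inr (Or.inl ⟨i, hi, hd⟩))))
    · have hne' : a ≠ b := fun e => hne (by rw [e])
      have hl' : a.length = b.length := by simpa using hl
      cases i with
      | zero => simp at hd; exact absurd hd hne'
      | succ i =>
        simp at hd hi
        exact Or.inr (Or.inr (Or.inr (Or.inr (Or.inr ⟨hl', hne', i, hi, hd⟩))))
  · rintro (h | h | (h | ⟨i, hi, hd⟩ | ⟨i, hi, hd⟩ | ⟨hl, hne, i, hi, hd⟩))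
    · exact Or.inr (Or.inl ⟨0, by simp, by simp [h]⟩)
    · exact Or.inr (Or.inr (Or.inl ⟨0, by simp, by simp [h.symm]⟩))
    · exact Or.inl (by rw [h])
    · exact Or.inr (Or.inl ⟨i + 1, by simp; omega, by simp [hd]⟩)
    · exact Or.inr (Or.inr (Or.inl ⟨i + 1, by simp; omega, by simp [hd]⟩))
    · refine Or.inr (Or.inr (Or.inr ⟨by simp [hl], fun e => hne (by injection e), i + 1, by simp; omega, by simp [hd]⟩))

lemma pvEdP_cons_diff (x y : Char) (a b : List Char) (hxy : x ≠ y) :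
    pvEdP (x :: a) (y :: b) ↔ a = y :: b ∨ x :: a = b ∨ a = b := by
  constructor
  · rintro (h | ⟨i, hi, hd⟩ | ⟨i, hi, hd⟩ | ⟨hl, hne, i, hi, hd⟩)
    · exact absurd (by injection h) hxy
    · cases i with
      | zero => simp at hd; exact Or.inl hd
      | succ i => simp at hd; exact absurd hd.1 hxy
    · cases i with
      | zero => simp at hd; exact Or.inr (Or.inl hd.symm)
      | succ i => simp at hd; exact absurd hd.1 (fun e => hxy e.symm)
    · cases i with
      | zero => simp at hd; exact Or.inr (Or.inr hd)
      | succ i => simp at hd; exact absurd hd.1 hxy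
  · rintro (h | h | h)
    · exact Or.inr (Or.inl ⟨0, by simp, by simp [h]⟩)
    · exact Or.inr (Or.inr (Or.inl ⟨0, by simp, by simp [h.symm]⟩))
    · refine Or.inr (Or.inr (Or.inr ⟨by simp [h], by simp [hxy], 0, by simp, by simp [h]⟩))

lemma pvLev_le_one_iff (a b : List Char) : pvLev a b ≤ 1 ↔ pvEdP a b := by
  induction a generalizing b with
  | nil => rw [pvEdP_nil_left, pvLev_nil_left]
  | cons x a ih =>
    cases b with
    | nil =>
      rw [pvEdP_nil_right, pvLev_nil_right]
    | cons y b =>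
      rw [pvLev_cons_cons]
      by_cases hxy : x = y
      · subst hxy
        rw [pvEdP_cons_same, if_pos rfl]
        have h1 := pvLev_eq_zero_iff a (x :: b)
        have h2 := pvLev_eq_zero_iff (x :: a) b
        have h3 := ih b
        constructor
        · intro h
          rcases (show pvLev a (x :: b) = 0 ∨ pvLev (x :: a) b = 0 ∨ pvLev a b ≤ 1 by omega) with
            h' | h' | h'
          · exact Or.inl (h1.mp h')
          · exact Or.inr (Or.inl (h2.mp h'))
          · exact Or.inr (Or.inr (h3.mp h'))
        · rintro (h | h | h)
          · have := h1.mpr h; omega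
          · have := h2.mpr h; omega
          · have := h3.mpr h; omega
      · rw [pvEdP_cons_diff x y a b hxy, if_neg hxy]
        have h1 := pvLev_eq_zero_iff a (y :: b)
        have h2 := pvLev_eq_zero_iff (x :: a) b
        have h3 := pvLev_eq_zero_iff a b
        constructor
        · intro h
          rcases (show pvLev a (y :: b) = 0 ∨ pvLev (x :: a) b = 0 ∨ pvLev a b = 0 by omega) with
            h' | h' | h'
          · exact Or.inl (h1.mp h')
          · exact Or.inr (Or.inl (h2.mp h'))
          · exact Or.inr (Or.inr (h3.mp h'))
        · rintro (h | h | h)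
          · have := h1.mpr h; omega
          · have := h2.mpr h; omega
          · have := h3.mpr h; omega

lemma pvEdP_symm (a b : List Char) : pvEdP a b ↔ pvEdP b a := by
  have key : ∀ u v : List Char, pvEdP u v → pvEdP v u := by
    rintro u v (h | h | h | ⟨hl, hne, i, hi, hd⟩)
    · exact Or.inl h.symm
    · exact Or.inr (Or.inr (Or.inl h))
    · exact Or.inr (Or.inl h)
    · exact Or.inr (Or.inr (Or.inr ⟨hl.symm, hne.symm, i, hl ▸ hi, hd.symm⟩))
  exact ⟨key a b, key b a⟩

lemma pvDelAt_reverse (l : List Char) (i : Nat) (h : i < l.length) :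
    pvDelAt l.reverse (l.length - 1 - i) = (pvDelAt l i).reverse := by
  unfold pvDelAt
  rw [List.take_reverse, List.drop_reverse, List.reverse_append,
      show l.length - (l.length - 1 - i) = i + 1 by omega,
      show l.length - (l.length - 1 - i + 1) = i by omega]

lemma pvEdP_rev_of (a b : List Char) (h : pvEdP a b) : pvEdP a.reverse b.reverse := by
  rcases h with h | ⟨i, hi, hd⟩ | ⟨i, hi, hd⟩ | ⟨hl, hne, i, hi, hd⟩
  · exact Or.inl (by rw [h])
  · refine Or.inr (Or.inl ⟨a.length - 1 - i, by simp; omega, ?_⟩)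
    rw [pvDelAt_reverse a i hi, hd]
  · refine Or.inr (Or.inr (Or.inl ⟨b.length - 1 - i, by simp; omega, ?_⟩))
    rw [pvDelAt_reverse b i hi, hd]
  · refine Or.inr (Or.inr (Or.inr ⟨by simp [hl], ?_, a.length - 1 - i, by simp; omega, ?_⟩))
    · intro e
      exact hne (by simpa using congrArg List.reverse e)
    · rw [pvDelAt_reverse a i hi, show a.length = b.length from hl,
          pvDelAt_reverse b i (hl ▸ hi), hd]

lemma pvEdP_reverse (a b : List Char) : pvEdP a.reverse b.reverse ↔ pvEdP a b := by
  constructor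
  · intro h
    have := pvEdP_rev_of _ _ h
    simpa using this
  · exact pvEdP_rev_of a b

-- ----- DP correctness: pvLevCore computes pvLev on the reversed strings -----

lemma pvPyGetD_neg_one {α : Type} (xs : List α) (d : α) (h : xs ≠ []) :
    PySem.List.pyGetD xs (-1) d = xs.getD (xs.length - 1) d := by
  have hl : 0 < xs.length := List.length_pos_of_ne_nil h
  unfold PySem.List.pyGetD PySem.List.pyGet? PySem.List.pyIdx?
  rw [if_neg (by omega), if_pos (show -(xs.length : Int) ≤ -1 by omega)]
  simp [List.getD_eq_getElem?_getD]

lemma pvInner_general (c1 : Char) (s2 : List Char) (p r : Nat → Int)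
    (hrec : ∀ j c, s2[j]? = some c →
      r (j + 1) = pvMin3 (p (j + 1) + 1) (r j + 1) (p j + (if c1 ≠ c then 1 else 0))) :
    ∀ (k : Nat) (t : List Char), t = s2.drop k → k ≤ s2.length →
      (PySem.List.enumerate t (k : Int)).foldl
          (pvLevStep c1 ((List.range (s2.length + 1)).map p)) ((List.range (k + 1)).map r)
        = (List.range (s2.length + 1)).map r := by
  intro k t
  induction t generalizing k with
  | nil =>
    intro ht hk
    have hkm : k = s2.length := by
      have := congrArg List.length ht
      simp at this
      omega
    subst hkm
    simp [PySem.List.enumerate]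
  | cons c2 t' ih =>
    intro ht hk
    have hk' : k < s2.length := by
      by_contra hcon
      rw [List.drop_eq_nil_of_le (by omega)] at ht
      simp at ht
    have hc : s2[k]? = some c2 := by
      have h0 : (s2.drop k)[0]? = some c2 := by rw [← ht]; rfl
      rw [List.getElem?_drop] at h0
      simpa using h0
    have ht' : t' = s2.drop (k + 1) := by
      have h1 : s2.drop (k + 1) = (s2.drop k).drop 1 := by
        rw [List.drop_drop]
      rw [h1, ← ht]
      rfl
    have henum : PySem.List.enumerate (c2 :: t') (k : Int) =
        ((k : Int), c2) :: PySem.List.enumerate t' ((k : Int) + 1) := by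
      simp [PySem.List.enumerate]
    rw [henum, List.foldl_cons]
    have hstep : pvLevStep c1 ((List.range (s2.length + 1)).map p)
        ((List.range (k + 1)).map r) (((k : Int), c2)) = (List.range (k + 1 + 1)).map r := by
      unfold pvLevStep
      have e1 : PySem.List.pyGetD ((List.range (s2.length + 1)).map p) ((k : Int) + 1) 0
          = p (k + 1) := by
        rw [show ((k : Int) + 1) = ((k + 1 : Nat) : Int) by push_cast; ring,
            PySem.List.pyGetD_natCast]
        exact PySem.List.getD_map_range _ _ _ _ (by omega)
      have e2 : PySem.List.pyGetD ((List.range (k + 1)).map r) ((k : Int)) 0 = r k := by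
        rw [PySem.List.pyGetD_natCast]
        exact PySem.List.getD_map_range _ _ _ _ (by omega)
      have e3 : PySem.List.pyGetD ((List.range (s2.length + 1)).map p) ((k : Int)) 0 = p k := by
        rw [PySem.List.pyGetD_natCast]
        exact PySem.List.getD_map_range _ _ _ _ (by omega)
      simp only [e1, e2, e3]
      rw [← hrec k c2 hc, List.range_succ (n := k + 1), List.map_append]
      rfl
    rw [hstep, show ((k : Int) + 1) = ((k + 1 : Nat) : Int) by push_cast; ring]
    exact ih (k + 1) ht' (by omega)

lemma pvTake_succ_reverse (l : List Char) (i : Nat) (c : Char) (h : l[i]? = some c) :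
    (l.take (i + 1)).reverse = c :: (l.take i).reverse := by
  rw [List.take_succ, h]
  simp

lemma pvOuter_general (s1 s2 : List Char) :
    ∀ (i : Nat) (t : List Char), t = s1.drop i → i ≤ s1.length →
      (PySem.List.enumerate t (i : Int)).foldl
          (fun prev ic => (PySem.List.enumerate s2).foldl (pvLevStep ic.2 prev) [ic.1 + 1])
          ((List.range (s2.length + 1)).map
            (fun j => (pvLev ((s1.take i).reverse) ((s2.take j).reverse) : Int)))
        = (List.range (s2.length + 1)).map
            (fun j => (pvLev s1.reverse ((s2.take j).reverse) : Int)) := by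
  intro i t
  induction t generalizing i with
  | nil =>
    intro ht hi
    have him : i = s1.length := by
      have := congrArg List.length ht
      simp at this
      omega
    subst him
    simp [PySem.List.enumerate, List.take_length]
  | cons c1 t' ih =>
    intro ht hi
    have hi' : i < s1.length := by
      by_contra hcon
      rw [List.drop_eq_nil_of_le (by omega)] at ht
      simp at ht
    have hc : s1[i]? = some c1 := by
      have h0 : (s1.drop i)[0]? = some c1 := by rw [← ht]; rfl
      rw [List.getElem?_drop] at h0
      simpa using h0
    have ht' : t' = s1.drop (i + 1) := by
      have h1 : s1.drop (i + 1) = (s1.drop i).drop 1 := by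
        rw [List.drop_drop]
      rw [h1, ← ht]
      rfl
    have henum : PySem.List.enumerate (c1 :: t') (i : Int) =
        ((i : Int), c1) :: PySem.List.enumerate t' ((i : Int) + 1) := by
      simp [PySem.List.enumerate]
    rw [henum, List.foldl_cons]
    have hs1 : (s1.take (i + 1)).reverse = c1 :: (s1.take i).reverse :=
      pvTake_succ_reverse s1 i c1 hc
    have hstep : (PySem.List.enumerate s2).foldl
        (pvLevStep c1 ((List.range (s2.length + 1)).map
          (fun j => (pvLev ((s1.take i).reverse) ((s2.take j).reverse) : Int)))) [(i : Int) + 1]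
        = (List.range (s2.length + 1)).map
            (fun j => (pvLev ((s1.take (i + 1)).reverse) ((s2.take j).reverse) : Int)) := by
      have hinit : [((i : Int) + 1)] = (List.range (0 + 1)).map
          (fun j => (pvLev ((s1.take (i + 1)).reverse) ((s2.take j).reverse) : Int)) := by
        simp [pvLev_nil_right]
        omega
      rw [hinit]
      have := pvInner_general c1 s2
        (fun j => (pvLev ((s1.take i).reverse) ((s2.take j).reverse) : Int))
        (fun j => (pvLev ((s1.take (i + 1)).reverse) ((s2.take j).reverse) : Int))
        ?_ 0 s2 rfl (by omega)
      · simpa using this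
      · intro j c hjc
        have hs2' : (s2.take (j + 1)).reverse = c :: (s2.take j).reverse :=
          pvTake_succ_reverse s2 j c hjc
        dsimp only
        simp only [hs1, hs2']
        rw [pvLev_cons_cons]
        unfold pvMin3
        push_cast
        by_cases hcc : c1 = c
        · simp [hcc]
        · simp [hcc, Ne.symm]
    rw [hstep, show ((i : Int) + 1) = ((i + 1 : Nat) : Int) by push_cast; ring]
    exact ih (i + 1) ht' (by omega)

lemma pvLevCore_eq (s1 s2 : List Char) :
    pvLevCore s1 s2 = (pvLev s1.reverse s2.reverse : Int) := by
  by_cases h2 : s2.length = 0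
  · have : s2 = [] := List.length_eq_zero_iff.mp h2
    subst this
    simp [pvLevCore, pvLev_nil_right]
  · unfold pvLevCore
    rw [if_neg h2]
    dsimp only
    have hprev0 : PySem.List.pyRange 0 ((s2.length : Int) + 1) 1
        = (List.range (s2.length + 1)).map
            (fun j => (pvLev ((s1.take 0).reverse) ((s2.take j).reverse) : Int)) := by
      rw [show ((s2.length : Int) + 1) = ((s2.length + 1 : Nat) : Int) by push_cast; ring,
          PySem.List.pyRange_zero_natCast]
      apply List.map_congr_left
      intro j hj
      rw [List.mem_range] at hj
      simp [pvLev_nil_left, List.length_take]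
      omega
    rw [hprev0]
    have houter := pvOuter_general s1 s2 0 s1 rfl (by omega)
    rw [show ((0 : Nat) : Int) = (0 : Int) by norm_num] at houter
    rw [houter]
    rw [pvPyGetD_neg_one _ _ (by simp)]
    rw [List.length_map, List.length_range]
    have : s2.length + 1 - 1 = s2.length := by omega
    rw [this, PySem.List.getD_map_range _ _ _ _ (by omega), List.take_length]

lemma pvLev_le_one_of_levenshtein (a b : List Char) :
    (levenshtein_distance a b ≤ 1) ↔ pvEdP a b := by
  unfold levenshtein_distance
  split_ifs with h
  · rw [pvLevCore_eq]
    rw [show ((pvLev b.reverse a.reverse : Int) ≤ 1) ↔ pvLev b.reverse a.reverse ≤ 1 by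
      exact_mod_cast Iff.rfl]
    rw [pvLev_le_one_iff, pvEdP_reverse, pvEdP_symm]
  · rw [pvLevCore_eq]
    rw [show ((pvLev a.reverse b.reverse : Int) ≤ 1) ↔ pvLev a.reverse b.reverse ≤ 1 by
      exact_mod_cast Iff.rfl]
    rw [pvLev_le_one_iff, pvEdP_reverse]

-- ----- B-side characterisations -----

lemma pvEdit1Scan_iff (a b : List Char) (h : b.length = a.length + 1) :
    pvEdit1Scan a b = true ↔ ∃ i, i < b.length ∧ pvDelAt b i = a := by
  induction a generalizing b with
  | nil =>
    cases b with
    | nil => simp at h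
    | cons y ys =>
      cases ys with
      | nil => simp [pvEdit1Scan]
      | cons z zs => simp at h
  | cons x xs ih =>
    cases b with
    | nil => simp at h
    | cons y ys =>
      have hy : ys.length = xs.length + 1 := by simpa using h
      by_cases hxy : x = y
      · subst hxy
        rw [show pvEdit1Scan (x :: xs) (x :: ys) = pvEdit1Scan xs ys by
          simp [pvEdit1Scan]]
        rw [ih ys hy]
        constructor
        · rintro ⟨i, hi, hd⟩
          exact ⟨i + 1, by simp; omega, by simp [hd]⟩
        · rintro ⟨i, hi, hd⟩
          cases i with
          | zero =>
            simp at hd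
            refine ⟨0, by omega, ?_⟩
            rw [hd]
            simp
          | succ i =>
            simp at hd hi
            exact ⟨i, by omega, hd⟩
      · rw [show pvEdit1Scan (x :: xs) (y :: ys) = decide (x :: xs = ys) by
          simp [pvEdit1Scan, hxy]]
        constructor
        · intro hs
          have hys : x :: xs = ys := of_decide_eq_true hs
          exact ⟨0, by simp, by simp [hys.symm]⟩
        · rintro ⟨i, hi, hd⟩
          cases i with
          | zero =>
            simp at hd
            exact decide_eq_true hd.symm
          | succ i =>
            simp at hd
            exact absurd hd.1 (fun e => hxy e.symm)

lemma pvCountDiff_zero_iff (a b : List Char) (h : a.length = b.length) :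
    List.countP (fun q => q.1 != q.2) (a.zip b) = 0 ↔ a = b := by
  induction a generalizing b with
  | nil =>
    cases b with
    | nil => simp
    | cons y ys => simp at h
  | cons x xs ih =>
    cases b with
    | nil => simp at h
    | cons y ys =>
      have hlen : xs.length = ys.length := by simpa using h
      rw [List.zip_cons_cons, List.countP_cons]
      by_cases hxy : x = y
      · subst hxy
        simp [ih ys hlen]
      · simp [hxy]

lemma pvCountDiff_one_iff (a b : List Char) (h : a.length = b.length) :
    List.countP (fun q => q.1 != q.2) (a.zip b) = 1 ↔
      (a ≠ b ∧ ∃ i, i < a.length ∧ pvDelAt a i = pvDelAt b i) := by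
  induction a generalizing b with
  | nil =>
    cases b with
    | nil => simp
    | cons y ys => simp at h
  | cons x xs ih =>
    cases b with
    | nil => simp at h
    | cons y ys =>
      have hlen : xs.length = ys.length := by simpa using h
      by_cases hxy : x = y
      · subst hxy
        rw [show List.countP (fun q => q.1 != q.2) ((x :: xs).zip (x :: ys))
            = List.countP (fun q => q.1 != q.2) (xs.zip ys) by
          simp [List.countP_cons], ih ys hlen]
        constructor
        · rintro ⟨hne, i, hi, hd⟩
          refine ⟨fun e => hne (by injection e), i + 1, by simp; omega, by simp [hd]⟩
        · rintro ⟨hne, i, hi, hd⟩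
          have hne' : xs ≠ ys := fun e => hne (by rw [e])
          cases i with
          | zero => simp at hd; exact absurd hd hne'
          | succ i =>
            simp at hd hi
            exact ⟨hne', i, hi, hd⟩
      · rw [show List.countP (fun q => q.1 != q.2) ((x :: xs).zip (y :: ys))
            = List.countP (fun q => q.1 != q.2) (xs.zip ys) + 1 by
          simp [List.countP_cons, hxy]]
        rw [show List.countP (fun q => q.1 != q.2) (xs.zip ys) + 1 = 1 ↔
            List.countP (fun q => q.1 != q.2) (xs.zip ys) = 0 from by omega,
          pvCountDiff_zero_iff xs ys hlen]
        constructor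
        · intro he
          subst he
          refine ⟨by simp [hxy], 0, by simp, by simp⟩
        · rintro ⟨hne, i, hi, hd⟩
          cases i with
          | zero => simpa using hd
          | succ i =>
            simp at hd
            exact absurd hd.1 hxy

lemma pvIsEdit1_core (a b : List Char) (hab : a ≠ b) (hle : a.length ≤ b.length) :
    (if a.length = b.length then
      decide ((((a.zip b).map (fun q => if q.1 ≠ q.2 then (1 : Int) else 0)).sum) = 1)
     else if (b.length : Int) - (a.length : Int) ≠ 1 then false
     else pvEdit1Scan a b) = true ↔ pvEdP a b := by
  by_cases hl : a.length = b.length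
  · rw [if_pos hl]
    have hmap : (fun q : Char × Char => if q.1 ≠ q.2 then (1 : Int) else 0)
        = (fun q : Char × Char => if (q.1 != q.2) = true then (1 : Int) else 0) := by
      funext q
      by_cases hq : q.1 = q.2 <;> simp [hq]
    rw [hmap, PySem.List.sum_map_ite_one_zero, decide_eq_true_eq, Nat.cast_eq_one,
      pvCountDiff_one_iff a b hl]
    constructor
    · rintro ⟨hne, i, hi, hd⟩
      exact Or.inr (Or.inr (Or.inr ⟨hl, hne, i, hi, hd⟩))
    · rintro (h | ⟨i, hi, hd⟩ | ⟨i, hi, hd⟩ | ⟨_, hne, i, hi, hd⟩)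
      · exact absurd h hab
      · exfalso
        have := pvDelAt_length a i hi
        rw [hd] at this
        omega
      · exfalso
        have := pvDelAt_length b i hi
        rw [hd] at this
        omega
      · exact ⟨hab, i, hi, hd⟩
  · rw [if_neg hl]
    by_cases hd1 : (b.length : Int) - (a.length : Int) ≠ 1
    · rw [if_pos hd1]
      have hbig : a.length + 2 ≤ b.length := by omega
      have hnot : ¬ pvEdP a b := by
        rintro (h | ⟨i, hi, hd⟩ | ⟨i, hi, hd⟩ | ⟨hleq, _, _⟩)
        · exact hab h
        · have := pvDelAt_length a i hi
          rw [hd] at this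
          omega
        · have := pvDelAt_length b i hi
          rw [hd] at this
          omega
        · omega
      simp [hnot]
    · rw [if_neg hd1]
      have hblen : b.length = a.length + 1 := by omega
      rw [pvEdit1Scan_iff a b hblen]
      constructor
      · rintro ⟨i, hi, hd⟩
        exact Or.inr (Or.inr (Or.inl ⟨i, hi, hd⟩))
      · rintro (h | ⟨i, hi, hd⟩ | ⟨i, hi, hd⟩ | ⟨hleq, _, _⟩)
        · exact absurd h hab
        · exfalso
          have := pvDelAt_length a i hi
          rw [hd] at this
          omega
        · exact ⟨i, hi, hd⟩
        · omega

lemma pvIsEdit1_iff (a b : List Char) : pvIsEdit1 a b = true ↔ pvEdP a b := by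
  by_cases hab : a = b
  · subst hab
    simp [pvIsEdit1, pvEdP]
  · rw [pvIsEdit1, if_neg hab]
    by_cases hlt : b.length < a.length
    · rw [if_pos hlt]
      rw [pvIsEdit1_core b a (fun e => hab e.symm) (by omega), pvEdP_symm]
    · rw [if_neg hlt]
      exact pvIsEdit1_core a b hab (by omega)

lemma pvVariants_eq (w : List Char) :
    pvVariants w = w :: (List.range w.length).map (pvDelAt w) := by
  unfold pvVariants
  rw [PySem.List.pyRange_zero_natCast, List.map_map]
  congr 1
  apply List.map_congr_left
  intro k hk
  simp only [Function.comp_apply]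
  rw [PySem.List.slice_to_natCast,
      show ((k : Int) + 1) = ((k + 1 : Nat) : Int) by push_cast; ring,
      PySem.List.slice_from_natCast]
  rfl

lemma pvMem_variants (w v : List Char) :
    v ∈ pvVariants w ↔ v = w ∨ ∃ i, i < w.length ∧ v = pvDelAt w i := by
  rw [pvVariants_eq]
  simp only [List.mem_cons, List.mem_map, List.mem_range]
  constructor
  · rintro (h | ⟨i, hi, hd⟩)
    · exact Or.inl h
    · exact Or.inr ⟨i, hi, hd.symm⟩
  · rintro (h | ⟨i, hi, hd⟩)
    · exact Or.inl h
    · exact Or.inr ⟨i, hi, hd.symm⟩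

lemma pvEdP_shared_variant (a b : List Char) (h : pvEdP a b) :
    ∃ v, v ∈ pvVariants a ∧ v ∈ pvVariants b := by
  rcases h with h | ⟨i, hi, hd⟩ | ⟨i, hi, hd⟩ | ⟨hl, _, i, hi, hd⟩
  · exact ⟨a, (pvMem_variants a a).mpr (Or.inl rfl), (pvMem_variants b a).mpr (Or.inl h)⟩
  · exact ⟨b, (pvMem_variants a b).mpr (Or.inr ⟨i, hi, hd.symm⟩),
      (pvMem_variants b b).mpr (Or.inl rfl)⟩
  · exact ⟨a, (pvMem_variants a a).mpr (Or.inl rfl),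
      (pvMem_variants b a).mpr (Or.inr ⟨i, hi, hd.symm⟩)⟩
  · exact ⟨pvDelAt a i, (pvMem_variants a _).mpr (Or.inr ⟨i, hi, rfl⟩),
      (pvMem_variants b _).mpr (Or.inr ⟨i, hl ▸ hi, hd⟩)⟩

-- ----- loop-shape lemmas -----

lemma pvFuzzyLoop_eq (fm : PySem.Set String) (w1 : String) (l : List String) :
    pvFuzzyLoop fm w1 l = if l.any (fun w2 => fuzzy_word_match w1 w2 1) then PySem.Set.add fm w1 else fm := by
  induction l with
  | nil => simp [pvFuzzyLoop]
  | cons w2 rest ih =>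
    by_cases h : fuzzy_word_match w1 w2 1 <;>
      simp [pvFuzzyLoop, List.any_cons, h, ih]

lemma pvFoldl_add_if (p : String → Bool) :
    ∀ (l : List String) (acc : PySem.Set String), l.Nodup → acc.Nodup → (∀ w ∈ l, w ∉ acc) →
      l.foldl (fun fm w => if p w then PySem.Set.add fm w else fm) acc = acc ++ l.filter p := by
  intro l
  induction l with
  | nil => intro acc _ _ _; simp
  | cons w l ih =>
    intro acc hnd hacc hdisj
    have hwl : w ∉ l := (List.nodup_cons.mp hnd).1
    have hnl : l.Nodup := (List.nodup_cons.mp hnd).2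
    have hwa : w ∉ acc := hdisj w (by simp)
    rw [List.foldl_cons, List.filter_cons]
    by_cases hp : p w
    · rw [if_pos hp, if_pos hp, PySem.Set.add_of_not_mem hwa]
      rw [ih (acc ++ [w]) hnl
        (by simp [List.nodup_append, hacc]; exact fun a ha he => hwa (he ▸ ha))
        (by
          intro x hx
          simp only [List.mem_append, List.mem_singleton]
          rintro (hxa | rfl)
          · exact hdisj x (by simp [hx]) hxa
          · exact hwl hx)]
      simp
    · rw [if_neg hp, if_neg hp]
      exact ih acc hnl hacc (fun x hx => hdisj x (by simp [hx]))

lemma pvIndex_getD (un2 : List String) (v : List Char) :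
    (un2.foldl (fun d w =>
        if (4 : Int) ≤ PySem.Str.len w then
          (pvVariants w.toList).foldl (fun d vv => d.modify vv [] (fun l => l ++ [w])) d
        else d) PySem.Dict.empty).getD v []
      = ((un2.flatMap (fun w => if (4 : Int) ≤ PySem.Str.len w
            then (pvVariants w.toList).map (fun vv => (vv, w)) else [])).filter
          (fun q => q.1 == v)).map (fun q => q.2) := by
  have h1 : (fun (d : PySem.Dict (List Char) (List String)) (w : String) =>
      if (4 : Int) ≤ PySem.Str.len w then
        (pvVariants w.toList).foldl (fun d vv => d.modify vv [] (fun l => l ++ [w])) d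
      else d)
    = (fun (d : PySem.Dict (List Char) (List String)) (w : String) =>
        List.foldl (fun d (q : List Char × String) => d.modify q.1 [] (fun l => l ++ [q.2])) d
          (if (4 : Int) ≤ PySem.Str.len w
            then (pvVariants w.toList).map (fun vv => (vv, w)) else [])) := by
    funext d w
    by_cases hg : (4 : Int) ≤ PySem.Str.len w
    · rw [if_pos hg, if_pos hg, List.foldl_map]
    · rw [if_neg hg, if_neg hg, List.foldl_nil]
  rw [h1, ← List.foldl_flatMap, PySem.Dict.getD_foldl_modify_append]
  simp

lemma pvMem_index (un2 : List String) (v : List Char) (w2 : String) :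
    w2 ∈ ((un2.flatMap (fun w => if (4 : Int) ≤ PySem.Str.len w
            then (pvVariants w.toList).map (fun vv => (vv, w)) else [])).filter
          (fun q => q.1 == v)).map (fun q => q.2)
      ↔ w2 ∈ un2 ∧ (4 : Int) ≤ PySem.Str.len w2 ∧ v ∈ pvVariants w2.toList := by
  simp only [List.mem_map, List.mem_filter, List.mem_flatMap]
  constructor
  · rintro ⟨q, ⟨⟨w, hw, hq⟩, hfst⟩, hsnd⟩
    split_ifs at hq with hg
    · obtain ⟨vv, hvv, hqe⟩ := List.mem_map.mp hq
      have hv : q.1 = v := by simpa using hfst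
      subst hqe
      simp only at hv hsnd
      subst hsnd
      rw [← hv]
      exact ⟨hw, hg, hvv⟩
    · simp at hq
  · rintro ⟨hw2, hg, hv⟩
    refine ⟨(v, w2), ⟨⟨w2, hw2, ?_⟩, by simp⟩, rfl⟩
    rw [if_pos hg]
    exact List.mem_map.mpr ⟨v, hv, rfl⟩

-- ----- per-element equivalence and assembly -----

lemma pvPerElement (un2 : List String) (w1 : String) (hne : ∀ w2 ∈ un2, w1 ≠ w2) :
    (un2.any (fun w2 => fuzzy_word_match w1 w2 1)) =
    (decide ((4 : Int) ≤ PySem.Str.len w1) &&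
      (pvVariants w1.toList).any (fun v =>
        (((un2.flatMap (fun w => if (4 : Int) ≤ PySem.Str.len w
            then (pvVariants w.toList).map (fun vv => (vv, w)) else [])).filter
          (fun q => q.1 == v)).map (fun q => q.2)).any
          (fun w2 => pvIsEdit1 w1.toList w2.toList))) := by
  rw [Bool.eq_iff_iff]
  simp only [List.any_eq_true, Bool.and_eq_true, decide_eq_true_eq]
  constructor
  · rintro ⟨w2, hw2, hf⟩
    have hne1 : w1 ≠ w2 := hne w2 hw2
    rw [fuzzy_word_match, if_neg hne1] at hf
    by_cases hlen : PySem.Str.len w1 < 4 ∨ PySem.Str.len w2 < 4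
    · rw [if_pos hlen] at hf
      exact absurd hf (by simp)
    · rw [if_neg hlen] at hf
      have hlev : levenshtein_distance w1.toList w2.toList ≤ 1 := of_decide_eq_true hf
      have hEd : pvEdP w1.toList w2.toList :=
        (pvLev_le_one_of_levenshtein _ _).mp hlev
      obtain ⟨v, hva, hvb⟩ := pvEdP_shared_variant _ _ hEd
      push_neg at hlen
      refine ⟨hlen.1, v, hva, ?_⟩
      refine ⟨w2, (pvMem_index un2 v w2).mpr ⟨hw2, hlen.2, hvb⟩, ?_⟩
      exact (pvIsEdit1_iff _ _).mpr hEd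
  · rintro ⟨h4, v, hva, w2, hw2mem, hEd1⟩
    obtain ⟨hw2, hg2, hvb⟩ := (pvMem_index un2 v w2).mp hw2mem
    have hEd : pvEdP w1.toList w2.toList := (pvIsEdit1_iff _ _).mp hEd1
    refine ⟨w2, hw2, ?_⟩
    rw [fuzzy_word_match, if_neg (hne w2 hw2), if_neg (by omega)]
    exact decide_eq_true ((pvLev_le_one_of_levenshtein _ _).mpr hEd)

-- ===== VERDICT (by name: the statement is the Claim_ definition above) =====
theorem count_matching_words_spec : Claim_equal_count_matching_words := by
  intro words1 words2 _
  unfold Spec_count_matching_words count_matching_words count_matching_words_alt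
  dsimp only
  have hnd1 : (PySem.Set.diff (PySem.Set.ofList words1)
      (PySem.Set.inter (PySem.Set.ofList words1) (PySem.Set.ofList words2))).Nodup :=
    PySem.Set.nodup_diff _ _ (PySem.Set.nodup_ofList _)
  have hdisj : ∀ w1' ∈ PySem.Set.diff (PySem.Set.ofList words1)
        (PySem.Set.inter (PySem.Set.ofList words1) (PySem.Set.ofList words2)),
      ∀ w2' ∈ PySem.Set.diff (PySem.Set.ofList words2)
        (PySem.Set.inter (PySem.Set.ofList words1) (PySem.Set.ofList words2)),
      w1' ≠ w2' := by
    intro w1' h1 w2' h2 he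
    rw [PySem.Set.mem_diff] at h1 h2
    subst he
    exact h1.2 ((PySem.Set.mem_inter _ _ _).mpr ⟨h1.1, h2.1⟩)
  set un1 := PySem.Set.diff (PySem.Set.ofList words1)
      (PySem.Set.inter (PySem.Set.ofList words1) (PySem.Set.ofList words2)) with hu1
  set un2 := PySem.Set.diff (PySem.Set.ofList words2)
      (PySem.Set.inter (PySem.Set.ofList words1) (PySem.Set.ofList words2)) with hu2
  congr 1
  have hloop : (fun (fm : PySem.Set String) (w1 : String) => pvFuzzyLoop fm w1 un2)
      = (fun fm w1 => if un2.any (fun w2 => fuzzy_word_match w1 w2 1)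
          then PySem.Set.add fm w1 else fm) := by
    funext fm w1
    exact pvFuzzyLoop_eq fm w1 un2
  rw [hloop]
  have hL : List.foldl (fun fm w1 => if un2.any (fun w2 => fuzzy_word_match w1 w2 1)
        then PySem.Set.add fm w1 else fm) PySem.Set.empty un1
      = PySem.Set.empty ++ un1.filter (fun w1 => un2.any (fun w2 => fuzzy_word_match w1 w2 1)) :=
    pvFoldl_add_if _ un1 PySem.Set.empty hnd1 List.nodup_nil
      (by intro w _ hw; simp [PySem.Set.empty] at hw)
  rw [hL]
  have hR : List.foldl (fun (n : Int) w1 =>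
        if decide ((4 : Int) ≤ PySem.Str.len w1) &&
            (pvVariants w1.toList).any (fun v =>
              (((un2.foldl (fun d w =>
                  if (4 : Int) ≤ PySem.Str.len w then
                    (pvVariants w.toList).foldl (fun d vv => d.modify vv [] (fun l => l ++ [w])) d
                  else d) PySem.Dict.empty)).getD v []).any
                (fun w2 => pvIsEdit1 w1.toList w2.toList)) then n + 1 else n) 0 un1
      = 0 + (List.countP (fun w1 =>
          decide ((4 : Int) ≤ PySem.Str.len w1) &&
            (pvVariants w1.toList).any (fun v =>
              (((un2.foldl (fun d w =>
                  if (4 : Int) ≤ PySem.Str.len w then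
                    (pvVariants w.toList).foldl (fun d vv => d.modify vv [] (fun l => l ++ [w])) d
                  else d) PySem.Dict.empty)).getD v []).any
                (fun w2 => pvIsEdit1 w1.toList w2.toList))) un1 : Nat) :=
    PySem.List.foldl_count_if _ un1 0
  rw [hR]
  simp only [PySem.Set.empty, List.nil_append, PySem.Set.len, zero_add]
  rw [← List.countP_eq_length_filter]
  congr 1
  simp only [pvIndex_getD]
  apply List.countP_congr
  intro w1 hw1
  rw [pvPerElement un2 w1 (fun w2 hw2 => hdisj w1 hw1 w2 hw2)]
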